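-- pv_equiv track=rewrite | github.com/omaralaz32/Pyspike_Test | Generate_surros.py | f_all_trains
-- ===== SOURCE A (Python) =====
-- def f_all_trains(spikes):
--     num_trains = len(spikes)
--     num_spikes_per_train = [len(train) for train in spikes]
--     dummy = [0] + num_spikes_per_train
--     all_indy = [0] * sum(num_spikes_per_train)
--
--     for trc in range(num_trains):
--         start_idx = sum(dummy[0:trc+1])
--         end_idx = start_idx + num_spikes_per_train[trc]
--         all_indy[start_idx:end_idx] = [trc+1] * num_spikes_per_train[trc]
--
--     sp_flat = [spike for train in spikes for spike in train]
--     sp_indy = sorted(range(len(sp_flat)), key=lambda i: sp_flat[i])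
--     all_trains = [all_indy[idx] for idx in sp_indy]
--     pooled = [sp_flat[idx] for idx in sp_indy]
--
--     return all_trains, pooled
-- ===== SOURCE B (Python) =====
-- def f_all_trains(spikes):
--     # Sort each train, then fold a stable two-way merge (left run wins ties) over the runs.
--     merged = []
--     for trc, train in enumerate(spikes):
--         run = [(t, trc + 1) for t in sorted(train)]
--         out = []
--         i = j = 0
--         while i < len(merged) and j < len(run):
--             if run[j][0] < merged[i][0]:
--                 out.append(run[j]); j += 1
--             else:
--                 out.append(merged[i]); i += 1
--         out.extend(merged[i:]); out.extend(run[j:])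
--         merged = out
--     return [p[1] for p in merged], [p[0] for p in merged]
-- ===== Notes on version B (the rewrite author's own statement) =====
-- stated objective: alternative
-- what changed: B sorts each train separately and combines the trains with an explicit stable two-way merge (left run wins ties) folded over the runs, instead of A's prefix-sum slice-assignment label array plus a single global argsort and two gather passes.
import Mathlib
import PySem

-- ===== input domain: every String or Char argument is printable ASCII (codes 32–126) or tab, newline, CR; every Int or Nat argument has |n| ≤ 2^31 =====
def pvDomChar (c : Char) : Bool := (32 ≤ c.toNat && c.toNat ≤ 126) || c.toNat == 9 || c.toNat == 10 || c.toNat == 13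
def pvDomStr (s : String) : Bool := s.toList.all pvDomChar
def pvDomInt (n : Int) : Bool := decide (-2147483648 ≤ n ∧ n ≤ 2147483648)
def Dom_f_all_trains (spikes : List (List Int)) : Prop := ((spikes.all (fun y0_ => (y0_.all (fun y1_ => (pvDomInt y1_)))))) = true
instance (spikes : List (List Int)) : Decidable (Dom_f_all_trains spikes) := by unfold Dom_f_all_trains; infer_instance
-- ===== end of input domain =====

-- B sorts each train separately and combines trains by folding a stable two-way merge
-- (left run wins ties), replacing A's prefix-sum label array plus global argsort and gathers.

-- ===== PORT A =====
-- slice assignment all_indy[s:e] = L is ported as take ++ L ++ drop via PySem.List.slice;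
-- exact here because the loop always has 0 ≤ s ≤ e ≤ len(all_indy).
def f_all_trains (spikes : List (List Int)) : List Int × List Int :=
  let num_trains : Int := (spikes.length : Int)
  let num_spikes_per_train : List Int := spikes.map (fun train => (train.length : Int))
  let dummy : List Int := 0 :: num_spikes_per_train
  let all_indy0 : List Int := List.replicate (num_spikes_per_train.sum).toNat 0
  let all_indy : List Int :=
    (PySem.List.pyRange 0 num_trains).foldl (fun acc trc =>
      let start_idx := (PySem.List.slice dummy (some 0) (some (trc + 1))).sum
      let end_idx := start_idx + PySem.List.pyGetD num_spikes_per_train trc 0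
      PySem.List.slice acc none (some start_idx)
        ++ List.replicate (PySem.List.pyGetD num_spikes_per_train trc 0).toNat (trc + 1)
        ++ PySem.List.slice acc (some end_idx) none) all_indy0
  let sp_flat : List Int := spikes.flatMap (fun train => train.map (fun spike => spike))
  -- key lambda i: sp_flat[i] — every i produced by range(len(sp_flat)) is in range, so pyGetD is exact
  let sp_indy := PySem.List.sorted (PySem.List.pyRange 0 (sp_flat.length : Int))
      (fun i => PySem.List.pyGetD sp_flat i 0)
  let all_trains := sp_indy.map (fun idx => PySem.List.pyGetD all_indy idx 0)
  let pooled := sp_indy.map (fun idx => PySem.List.pyGetD sp_flat idx 0)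
  (all_trains, pooled)

-- ===== PORT B =====
-- the while-loop two-way merge of Source B, as the equivalent two-list recursion
def pvMerge : List (Int × Int) → List (Int × Int) → List (Int × Int)
  | [], ys => ys
  | x :: xs, [] => x :: xs
  | x :: xs, y :: ys =>
    if y.1 < x.1 then y :: pvMerge (x :: xs) ys else x :: pvMerge xs (y :: ys)
  termination_by xs ys => xs.length + ys.length

def f_all_trains_alt (spikes : List (List Int)) : List Int × List Int :=
  let merged : List (Int × Int) :=
    (PySem.List.enumerate spikes).foldl (fun merged p =>
      pvMerge merged ((PySem.List.sorted p.2 (fun t => t)).map (fun t => (t, p.1 + 1)))) []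
  (merged.map (fun p => p.2), merged.map (fun p => p.1))

-- ===== PRECONDITION & SPEC =====
def Spec_f_all_trains (spikes : List (List Int)) (out : List Int × List Int) : Prop := out = f_all_trains_alt spikes
instance (spikes : List (List Int)) (out : List Int × List Int) : Decidable (Spec_f_all_trains spikes out) := by unfold Spec_f_all_trains; infer_instance

-- ===== CLAIM (what is proved, stated in full; the proofs are below) =====
def Claim_equal_f_all_trains : Prop := ∀ (spikes : List (List Int)), Dom_f_all_trains spikes → Spec_f_all_trains spikes (f_all_trains spikes)

-- ===== LEMMAS AND PROOFS =====

-- the flat train-label list: labAux i [t0, t1, …] = (i+1)^|t0| ++ (i+2)^|t1| ++ …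
def labAux (i : Int) : List (List Int) → List Int
  | [] => []
  | t :: ts => List.replicate t.length (i + 1) ++ labAux (i + 1) ts

theorem labAux_length (i : Int) (xs : List (List Int)) :
    (labAux i xs).length = (xs.map List.length).sum := by
  induction xs generalizing i with
  | nil => simp [labAux]
  | cons t ts ih => simp [labAux, ih]

theorem labAux_append_singleton (xs : List (List Int)) (y : List Int) (i : Int) :
    labAux i (xs ++ [y]) = labAux i xs ++ List.replicate y.length (i + (xs.length : Int) + 1) := by
  induction xs generalizing i with
  | nil => simp [labAux]
  | cons t ts ih =>
    rw [List.cons_append]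
    show List.replicate t.length (i + 1) ++ labAux (i + 1) (ts ++ [y]) = _
    rw [ih, show ((i + 1) + (ts.length : Int) + 1)
        = i + ((((t :: ts : List (List Int))).length : Int)) + 1 by push_cast [List.length_cons]; ring]
    simp [labAux, List.append_assoc]

theorem zip_replicate_self (t : List Int) (c : Int) :
    t.zip (List.replicate t.length c) = t.map (fun x => (x, c)) := by
  induction t with
  | nil => rfl
  | cons x xs ih => simp [List.replicate_succ, ih]

-- A's (flat value, label) pair list is the flattened spikes zipped with the label list
theorem pairs_eq_zip (spikes : List (List Int)) (i : Int) :
    (PySem.List.enumerate spikes i).flatMap (fun p => p.2.map (fun t => (t, p.1 + 1)))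
      = (spikes.flatMap id).zip (labAux i spikes) := by
  induction spikes generalizing i with
  | nil => rfl
  | cons t ts ih =>
    simp only [PySem.List.enumerate, List.flatMap_cons, labAux]
    rw [List.zip_append (by simp)]
    simp [ih, zip_replicate_self]

-- stable insertion commutes with map when the order only looks at images
theorem insertBy_map {α β : Type} (f : α → β) (B : β → β → Bool) (x : α) (acc : List α) :
    PySem.List.insertBy B (f x) (acc.map f)
      = (PySem.List.insertBy (fun a b => B (f a) (f b)) x acc).map f := by
  induction acc with
  | nil => rfl
  | cons y ys ih =>
    simp only [List.map_cons, PySem.List.insertBy]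
    by_cases h : B (f x) (f y) = true <;> simp [h, ih]

theorem sorted_map_key {α β κ : Type} [LinearOrder κ] (f : α → β) (k : β → κ) (l : List α) :
    PySem.List.sorted (l.map f) k = (PySem.List.sorted l (fun x => k (f x))).map f := by
  simp only [PySem.List.sorted]
  suffices h : ∀ (acc : List α),
      (l.map f).foldl (fun acc x => PySem.List.insertBy (fun a b => decide (k a < k b)) x acc) (acc.map f)
        = (l.foldl (fun acc x => PySem.List.insertBy (fun a b => decide (k (f a) < k (f b))) x acc) acc).map f by
    simpa using h []
  induction l with
  | nil => intro acc; rfl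
  | cons x xs ih => intro acc; simp only [List.map_cons, List.foldl_cons, insertBy_map f, ih]

-- indexing [0, n) into two equal-length lists gives their zip
theorem map_getD_range_zip (xs ys : List Int) (h : ys.length = xs.length) :
    (PySem.List.pyRange 0 (xs.length : Int)).map
        (fun i => (PySem.List.pyGetD xs i 0, PySem.List.pyGetD ys i 0))
      = xs.zip ys := by
  rw [PySem.List.pyRange_zero_natCast, List.map_map]
  apply List.ext_getElem
  · simp [h]
  · intro n h1 h2
    simp only [List.getElem_map, List.getElem_range, Function.comp_apply,
      PySem.List.pyGetD_natCast, List.getElem_zip]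
    have hx : n < xs.length := by simpa using h1
    have hy : n < ys.length := by omega
    simp [List.getD_eq_getElem?_getD, hx, hy]

theorem loop_eq_labAux (spikes : List (List Int)) :
    (PySem.List.pyRange 0 ((spikes.length : Nat) : Int)).foldl (fun acc trc =>
        PySem.List.slice acc none
            (some ((PySem.List.slice (0 :: spikes.map (fun t => (t.length : Int))) (some 0) (some (trc + 1))).sum))
          ++ List.replicate (PySem.List.pyGetD (spikes.map (fun t => (t.length : Int))) trc 0).toNat (trc + 1)
          ++ PySem.List.slice acc
              (some ((PySem.List.slice (0 :: spikes.map (fun t => (t.length : Int))) (some 0) (some (trc + 1))).sum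
                + PySem.List.pyGetD (spikes.map (fun t => (t.length : Int))) trc 0)) none)
      (List.replicate ((spikes.map (fun t => (t.length : Int))).sum).toNat 0)
    = labAux 0 spikes := by
  have hsum : ∀ (xs : List (List Int)),
      (xs.map (fun t => (t.length : Int))).sum = ((xs.map List.length).sum : Int) := by
    intro xs; induction xs with
    | nil => simp
    | cons t ts ih => simp [ih]
  have hN : ((spikes.map (fun t => (t.length : Int))).sum).toNat = (spikes.map List.length).sum := by
    rw [hsum]; exact Int.toNat_natCast _
  set N : Nat := (spikes.map List.length).sum with hNdef
  have key : ∀ k, k ≤ spikes.length →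
      (PySem.List.pyRange 0 ((k : Nat) : Int)).foldl (fun acc trc =>
        PySem.List.slice acc none
            (some ((PySem.List.slice (0 :: spikes.map (fun t => (t.length : Int))) (some 0) (some (trc + 1))).sum))
          ++ List.replicate (PySem.List.pyGetD (spikes.map (fun t => (t.length : Int))) trc 0).toNat (trc + 1)
          ++ PySem.List.slice acc
              (some ((PySem.List.slice (0 :: spikes.map (fun t => (t.length : Int))) (some 0) (some (trc + 1))).sum
                + PySem.List.pyGetD (spikes.map (fun t => (t.length : Int))) trc 0)) none)
        (List.replicate N 0)
      = labAux 0 (spikes.take k)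
          ++ List.replicate (N - ((spikes.take k).map List.length).sum) 0 := by
    intro k hk
    induction k with
    | zero => simp [PySem.List.pyRange, labAux]
    | succ k ih =>
      have hk' : k < spikes.length := hk
      have hstep : ((k + 1 : Nat) : Int) = ((k : Nat) : Int) + 1 := by push_cast; ring
      rw [hstep, PySem.List.pyRange_one_succ_right (by positivity), List.foldl_append,
        ih (le_of_lt hk')]
      simp only [List.foldl_cons, List.foldl_nil]
      -- names for the pieces
      set Sk : Nat := ((spikes.take k).map List.length).sum with hSk
      have hlab : (labAux 0 (spikes.take k)).length = Sk := labAux_length 0 _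
      -- the start index is Sk
      have hslice0 : (PySem.List.slice (0 :: spikes.map (fun t => (t.length : Int)))
          (some 0) (some (((k : Nat) : Int) + 1))).sum = (Sk : Int) := by
        have h1 : PySem.List.slice (0 :: spikes.map (fun t => (t.length : Int)))
            (some 0) (some (((k : Nat) : Int) + 1))
            = List.take (k + 1) (0 :: spikes.map (fun t => (t.length : Int))) := by
          rw [show (((k : Nat) : Int) + 1) = (((k + 1 : Nat) : Nat) : Int) by push_cast; ring]
          have h2 := PySem.List.slice_natCast (0 :: spikes.map (fun t => (t.length : Int))) 0 (k + 1)
          simpa using h2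
        rw [h1]
        simp only [List.take_succ_cons, List.sum_cons, ← List.map_take, hsum]
        simp [hSk]
      -- the per-train spike count
      have hget : PySem.List.pyGetD (spikes.map (fun t => (t.length : Int))) ((k : Nat) : Int) 0
          = (spikes[k].length : Int) := by
        rw [PySem.List.pyGetD_natCast]
        rw [List.getD_eq_getElem _ _ (by simpa using hk')]
        simp
      rw [hslice0, hget]
      rw [PySem.List.slice_to _ (by positivity),
        show ((Sk : Int) + (spikes[k].length : Int)) = ((Sk + spikes[k].length : Nat) : Int) by push_cast; ring,
        PySem.List.slice_from _ (by positivity)]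
      simp only [Int.toNat_natCast]
      -- take Sk of (lab ++ zeros) = lab ; drop (Sk + len) = the remaining zeros
      rw [show List.take Sk (labAux 0 (spikes.take k) ++ List.replicate (N - Sk) 0)
            = labAux 0 (spikes.take k) by
          rw [← hlab, List.take_left]]
      rw [show List.drop (Sk + spikes[k].length)
              (labAux 0 (spikes.take k) ++ List.replicate (N - Sk) 0)
            = List.replicate (N - (Sk + spikes[k].length)) 0 by
          rw [List.drop_append, hlab, List.drop_replicate,
            List.drop_eq_nil_of_le (by omega), List.nil_append]
          congr 1
          omega]
      -- fold the new segment into labAux of (take (k+1))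
      have htake : spikes.take (k + 1) = spikes.take k ++ [spikes[k]] :=
        List.take_succ_eq_append_getElem hk'
      rw [htake, labAux_append_singleton]
      have hlen : ((spikes.take k).length : Int) = (k : Int) := by
        simp [List.length_take, Nat.min_eq_left (le_of_lt hk')]
      rw [hlen]
      have hsum2 : ((spikes.take k ++ [spikes[k]]).map List.length).sum = Sk + spikes[k].length := by
        rw [List.map_append, List.sum_append]; simp [hSk]
      rw [hsum2]
      simp [List.append_assoc, zero_add]
  have := key spikes.length (le_refl _)
  rw [hN]
  rw [this]
  simp [hNdef]

-- ===== merge-side lemmas =====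

-- stable insertion by first component (the step of PySem.List.sorted with key fst)
def pvIns (x : Int × Int) (acc : List (Int × Int)) : List (Int × Int) :=
  PySem.List.insertBy (fun a b => decide (a.1 < b.1)) x acc

theorem pvIns_nil (x : Int × Int) : pvIns x [] = [x] := rfl

theorem pvIns_cons_lt (x z : Int × Int) (zs : List (Int × Int)) (h : x.1 < z.1) :
    pvIns x (z :: zs) = x :: z :: zs := by
  simp [pvIns, PySem.List.insertBy, h]

theorem pvIns_cons_ge (x z : Int × Int) (zs : List (Int × Int)) (h : ¬ x.1 < z.1) :
    pvIns x (z :: zs) = z :: pvIns x zs := by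
  simp [pvIns, PySem.List.insertBy, h]

-- equation lemmas for the well-founded pvMerge
theorem pvMerge_nil_left (ys : List (Int × Int)) : pvMerge [] ys = ys := by
  cases ys <;> simp [pvMerge]

theorem pvMerge_nil_right (xs : List (Int × Int)) : pvMerge xs [] = xs := by
  cases xs <;> simp [pvMerge]

theorem pvMerge_cons_cons (x y : Int × Int) (xs ys : List (Int × Int)) :
    pvMerge (x :: xs) (y :: ys)
      = if y.1 < x.1 then y :: pvMerge (x :: xs) ys else x :: pvMerge xs (y :: ys) := by
  simp [pvMerge]

-- two inserts with strictly ordered keys commute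
theorem pvIns_comm (x y : Int × Int) (h : x.1 < y.1) (acc : List (Int × Int)) :
    pvIns y (pvIns x acc) = pvIns x (pvIns y acc) := by
  have hyx : ¬ y.1 < x.1 := not_lt.mpr h.le
  induction acc with
  | nil =>
    rw [pvIns_nil, pvIns_nil, pvIns_cons_ge y x [] hyx, pvIns_cons_lt x y [] h, pvIns_nil]
  | cons z zs ih =>
    by_cases hx : x.1 < z.1
    · by_cases hy : y.1 < z.1
      · rw [pvIns_cons_lt x z zs hx, pvIns_cons_ge y x (z :: zs) hyx,
          pvIns_cons_lt y z zs hy, pvIns_cons_lt x y (z :: zs) h]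
      · rw [pvIns_cons_lt x z zs hx, pvIns_cons_ge y x (z :: zs) hyx,
          pvIns_cons_ge y z zs hy, pvIns_cons_lt x z (pvIns y zs) hx]
    · have hy : ¬ y.1 < z.1 := fun hc => hx (lt_trans h hc)
      rw [pvIns_cons_ge x z zs hx, pvIns_cons_ge y z (pvIns x zs) hy,
        pvIns_cons_ge y z zs hy, pvIns_cons_ge x z (pvIns y zs) hx, ih]

-- inserting x first, then elements all strictly greater, equals inserting x last
theorem foldl_pvIns_cons_of_lt (x : Int × Int) (m : List (Int × Int))
    (h : ∀ z ∈ m, x.1 < z.1) (acc : List (Int × Int)) :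
    m.foldl (fun a p => pvIns p a) (pvIns x acc) = pvIns x (m.foldl (fun a p => pvIns p a) acc) := by
  induction m generalizing acc with
  | nil => rfl
  | cons z zs ih =>
    simp only [List.foldl_cons]
    rw [pvIns_comm x z (h z (by simp)) acc]
    exact ih (fun w hw => h w (by simp [hw])) (pvIns z acc)

-- folding inserts over (pvIns x m) = insert m then x, for key-sorted m
theorem foldl_pvIns_insert (x : Int × Int) (m : List (Int × Int))
    (hm : m.Pairwise (fun a b => a.1 ≤ b.1)) (acc : List (Int × Int)) :
    (pvIns x m).foldl (fun a p => pvIns p a) acc = pvIns x (m.foldl (fun a p => pvIns p a) acc) := by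
  induction m generalizing acc with
  | nil => rfl
  | cons y m' ih =>
    by_cases hxy : x.1 < y.1
    · have hall : ∀ z ∈ y :: m', x.1 < z.1 := by
        intro z hz
        rcases List.mem_cons.mp hz with rfl | hz'
        · exact hxy
        · exact lt_of_lt_of_le hxy ((List.pairwise_cons.mp hm).1 z hz')
      rw [pvIns_cons_lt x y m' hxy, List.foldl_cons]
      exact foldl_pvIns_cons_of_lt x (y :: m') hall acc
    · rw [pvIns_cons_ge x y m' hxy]
      simp only [List.foldl_cons]
      exact ih (List.pairwise_cons.mp hm).2 (pvIns y acc)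

-- folding inserts over the stable sort of p equals folding them over p
theorem foldl_pvIns_sorted (p : List (Int × Int)) (acc : List (Int × Int)) :
    (PySem.List.sorted p (fun q => q.1)).foldl (fun a q => pvIns q a) acc
      = p.foldl (fun a q => pvIns q a) acc := by
  induction p using List.reverseRecOn generalizing acc with
  | nil => rfl
  | append_singleton p x ih =>
    have hs : PySem.List.sorted (p ++ [x]) (fun q => q.1)
        = pvIns x (PySem.List.sorted p (fun q => q.1)) := by
      rw [PySem.List.sorted_eq_foldl_insertBy, PySem.List.sorted_eq_foldl_insertBy,
        List.foldl_append]
      rfl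
    rw [hs, foldl_pvIns_insert x _ (PySem.List.sorted_pairwise p (fun q => q.1)) acc, ih,
      List.foldl_append]
    rfl

-- merging one element whose key is ≤ every key of ys equals inserting it first
theorem pvMerge_ins (xs ys : List (Int × Int)) (y : Int × Int)
    (h : ∀ z ∈ ys, y.1 ≤ z.1) :
    pvMerge xs (y :: ys) = pvMerge (pvIns y xs) ys := by
  induction xs with
  | nil =>
    rw [pvIns_nil, pvMerge_nil_left]
    cases ys with
    | nil => rw [pvMerge_nil_right]
    | cons z zs =>
      have hz : ¬ z.1 < y.1 := not_lt.mpr (h z (by simp))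
      rw [pvMerge_cons_cons, if_neg hz, pvMerge_nil_left]
  | cons x xs' ih =>
    by_cases hxy : y.1 < x.1
    · rw [pvIns_cons_lt y x xs' hxy]
      have hl : pvMerge (x :: xs') (y :: ys) = y :: pvMerge (x :: xs') ys := by
        rw [pvMerge_cons_cons, if_pos hxy]
      cases ys with
      | nil => rw [hl, pvMerge_nil_right, pvMerge_nil_right]
      | cons z zs =>
        have hz : ¬ z.1 < y.1 := not_lt.mpr (h z (by simp))
        rw [hl, show pvMerge (y :: x :: xs') (z :: zs) = y :: pvMerge (x :: xs') (z :: zs) from by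
          rw [pvMerge_cons_cons, if_neg hz]]
    · rw [pvIns_cons_ge y x xs' hxy]
      have hl : pvMerge (x :: xs') (y :: ys) = x :: pvMerge xs' (y :: ys) := by
        rw [pvMerge_cons_cons, if_neg hxy]
      cases ys with
      | nil => rw [hl, ih, pvMerge_nil_right, pvMerge_nil_right]
      | cons z zs =>
        have hz : ¬ z.1 < x.1 :=
          not_lt.mpr (le_trans (not_lt.mp hxy) (h z (by simp)))
        rw [hl, ih,
          show pvMerge (x :: pvIns y xs') (z :: zs) = x :: pvMerge (pvIns y xs') (z :: zs) from by
            rw [pvMerge_cons_cons, if_neg hz]]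

-- merging a key-sorted right list equals folding stable inserts of it
theorem pvMerge_eq_foldl (xs ys : List (Int × Int))
    (hys : ys.Pairwise (fun a b => a.1 ≤ b.1)) :
    pvMerge xs ys = ys.foldl (fun a q => pvIns q a) xs := by
  induction ys generalizing xs with
  | nil => rw [pvMerge_nil_right]; rfl
  | cons y ys' ih =>
    rw [List.foldl_cons,
      pvMerge_ins xs ys' y (List.pairwise_cons.mp hys).1,
      ih (pvIns y xs) (List.pairwise_cons.mp hys).2]

-- B's fold of merges over per-train sorted runs = fold of stable inserts over all pairs
theorem foldl_merge_eq (spikes : List (List Int)) (i : Int) (acc : List (Int × Int)) :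
    (PySem.List.enumerate spikes i).foldl (fun merged p =>
        pvMerge merged ((PySem.List.sorted p.2 (fun t => t)).map (fun t => (t, p.1 + 1)))) acc
      = ((PySem.List.enumerate spikes i).flatMap (fun p => p.2.map (fun t => (t, p.1 + 1)))).foldl
          (fun a q => pvIns q a) acc := by
  induction spikes generalizing i acc with
  | nil => rfl
  | cons t ts ih =>
    simp only [PySem.List.enumerate, List.foldl_cons, List.flatMap_cons, List.foldl_append]
    have hrun : (PySem.List.sorted t (fun x => x)).map (fun x => (x, i + 1))
        = PySem.List.sorted (t.map (fun x => (x, i + 1))) (fun q : Int × Int => q.1) :=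
      (sorted_map_key (fun x => (x, i + 1)) (fun q : Int × Int => q.1) t).symm
    rw [hrun,
      pvMerge_eq_foldl acc _ (PySem.List.sorted_pairwise _ _),
      foldl_pvIns_sorted (t.map (fun x => (x, i + 1))) acc, ih]

-- B's merged list is the stable sort of all (value, label) pairs by value
theorem alt_merged_eq_sorted (spikes : List (List Int)) :
    (PySem.List.enumerate spikes).foldl (fun merged p =>
        pvMerge merged ((PySem.List.sorted p.2 (fun t => t)).map (fun t => (t, p.1 + 1)))) []
      = PySem.List.sorted
          ((PySem.List.enumerate spikes).flatMap (fun p => p.2.map (fun t => (t, p.1 + 1))))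
          (fun q : Int × Int => q.1) := by
  rw [foldl_merge_eq spikes 0 [], PySem.List.sorted_eq_foldl_insertBy]
  rfl

-- ===== VERDICT (by name: the statement is the Claim_ definition above) =====
theorem f_all_trains_spec : Claim_equal_f_all_trains := by
  intro spikes _
  unfold Spec_f_all_trains
  simp only [f_all_trains, f_all_trains_alt]
  rw [alt_merged_eq_sorted, pairs_eq_zip spikes 0,
    loop_eq_labAux,
    show spikes.flatMap (fun train => train.map fun spike => spike) = spikes.flatMap id by simp]
  have hlen : (labAux 0 spikes).length = (spikes.flatMap id).length := by
    rw [labAux_length]; simp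
  rw [← map_getD_range_zip (spikes.flatMap id) (labAux 0 spikes) hlen,
    sorted_map_key
      (fun i => (PySem.List.pyGetD (spikes.flatMap id) i 0, PySem.List.pyGetD (labAux 0 spikes) i 0))
      (fun p : Int × Int => p.1) (PySem.List.pyRange 0 ((spikes.flatMap id).length : Int)),
    List.map_map, List.map_map]
  rfl
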